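-- pv_equiv track=rewrite | github.com/imdayoung/algorithm-study | 프로그래머스/수학/최고의 집합.py | solution
-- ===== SOURCE A (Python) =====
-- def solution(n, s):
--     num = s // n
--     rem = s % n
--
--     if num < 1:
--         return [-1]
--
--     answer = [num for _ in range(n)]
--     i = n - 1
--     while rem > 0:
--         answer[i] += 1
--         i -= 1
--         rem -= 1
--
--     return answer
-- ===== SOURCE B (Python) =====
-- def solution(n, s):
--     if s // n < 1:
--         return [-1]
--     # Greedy: the largest element of a best set is ceil(t/k); peel it off repeatedly.
--     out = []
--     k, t = n, s
--     while k > 0: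
--         x = -(-t // k)  # ceiling division
--         out.append(x)
--         t -= x
--         k -= 1
--     out.reverse()
--     return out
-- ===== Notes on version B (the rewrite author's own statement) =====
-- stated objective: alternative
-- what changed: Replaced the fill-uniform-then-increment-the-tail construction by a greedy peeling loop: repeatedly take the largest element ceil(t/k) of the remaining sum, append it, and reverse at the end; no uniform list, remainder counter or index arithmetic remains.
import Mathlib
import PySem

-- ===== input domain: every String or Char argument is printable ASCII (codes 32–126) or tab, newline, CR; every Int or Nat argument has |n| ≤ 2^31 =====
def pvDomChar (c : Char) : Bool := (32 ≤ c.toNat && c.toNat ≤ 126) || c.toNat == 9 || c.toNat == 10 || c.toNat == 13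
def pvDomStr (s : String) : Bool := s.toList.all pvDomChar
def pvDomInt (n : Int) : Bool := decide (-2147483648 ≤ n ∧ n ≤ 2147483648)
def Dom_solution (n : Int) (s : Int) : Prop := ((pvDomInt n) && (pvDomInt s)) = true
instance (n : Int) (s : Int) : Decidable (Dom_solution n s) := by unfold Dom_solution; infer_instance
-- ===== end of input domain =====

-- B replaces A's fill-then-increment construction by a greedy peeling loop:
-- repeatedly append the largest element ceil(t/k), then reverse (objective: alternative).

-- ===== PORT A =====
-- the while loop: 'while rem > 0: answer[i] += 1; i -= 1; rem -= 1'
def solutionLoop (answer : List Int) (i : Int) (rem : Int) : List Int :=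
  if h : 0 < rem then
    solutionLoop (PySem.List.pySetD answer i (PySem.List.pyGetD answer i 0 + 1)) (i - 1) (rem - 1)
  else answer
termination_by rem.toNat
decreasing_by omega

def solution (n : Int) (s : Int) : List Int :=
  let num := PySem.Int.floordiv s n
  let rem := PySem.Int.mod s n
  if num < 1 then [-1]
  else
    let answer := (PySem.List.pyRange 0 n 1).map (fun _ => num)
    solutionLoop answer (n - 1) rem

-- ===== PORT B =====
-- 'while k > 0: x = -(-t // k); out.append(x); t -= x; k -= 1', then 'out.reverse()'
def buildLoop (k : Int) (t : Int) (out : List Int) : List Int :=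
  if _h : 0 < k then
    let x := -(PySem.Int.floordiv (-t) k)
    buildLoop (k - 1) (t - x) (out ++ [x])
  else out
termination_by k.toNat
decreasing_by omega

def solution_alt (n : Int) (s : Int) : List Int :=
  if PySem.Int.floordiv s n < 1 then [-1]
  else (buildLoop n s []).reverse

-- ===== PRECONDITION & SPEC =====
-- n = 0 makes the Python A raise ZeroDivisionError at 's // n'.
def Pre_solution (n : Int) (_s : Int) : Prop := n ≠ 0
instance (n : Int) (s : Int) : Decidable (Pre_solution n s) := by unfold Pre_solution; infer_instance
def pvWitness_solution : Int × Int := (3, 14)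

def Spec_solution (n : Int) (s : Int) (out : List Int) : Prop := out = solution_alt n s
instance (n : Int) (s : Int) (out : List Int) : Decidable (Spec_solution n s out) := by unfold Spec_solution; infer_instance

-- ===== CLAIM (what is proved, stated in full; the proofs are below) =====
def Claim_equal_solution : Prop := ∀ (n : Int) (s : Int), Dom_solution n s → Pre_solution n s → Spec_solution n s (solution n s)

-- ===== LEMMAS AND PROOFS =====

theorem fmod_neg_bounds (a b : Int) (hb : b < 0) : b < a.fmod b ∧ a.fmod b ≤ 0 := by
  have h2 : a.fmod b = -((-a).fmod (-b)) := by
    rw [Int.fmod_def, Int.fmod_def, Int.neg_fdiv_neg]; ring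
  have he : (-a).fmod (-b) = (-a) % (-b) := by
    rw [Int.fmod_eq_emod]; omega
  have h3 := Int.emod_lt_of_pos (-a) (b := -b) (by omega)
  have h4 := Int.emod_nonneg (-a) (b := -b) (by omega)
  omega

theorem set_repl (a b : Nat) (ha : 1 ≤ a) (num : Int) :
    (List.replicate a num ++ List.replicate b (num + 1)).set (a - 1) (num + 1)
    = List.replicate (a - 1) num ++ List.replicate (b + 1) (num + 1) := by
  have hsplit : List.replicate a num = List.replicate (a - 1) num ++ List.replicate 1 num := by
    rw [← List.replicate_add]; congr 1; omega
  rw [hsplit, List.append_assoc, List.set_append]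
  simp [List.replicate_succ]

-- A's loop bumps the last r entries of a uniform list by one.
theorem loop_inv (num : Int) : ∀ (r a b : Nat), r ≤ a →
    solutionLoop (List.replicate a num ++ List.replicate b (num + 1)) ((a : Int) - 1) r
    = List.replicate (a - r) num ++ List.replicate (b + r) (num + 1) := by
  intro r
  induction r with
  | zero => intro a b _; rw [solutionLoop]; simp
  | succ r ih =>
    intro a b hra
    have ha : 1 ≤ a := by omega
    rw [solutionLoop]
    simp only [show (0:Int) < (r+1:Nat) from by exact_mod_cast Nat.succ_pos r, dif_pos]
    have hidx : ((a : Int) - 1) = ((a - 1 : Nat) : Int) := by omega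
    have hget : PySem.List.pyGetD (List.replicate a num ++ List.replicate b (num + 1)) ((a : Int) - 1) 0 = num := by
      rw [hidx, PySem.List.pyGetD_natCast]
      rw [List.getD_eq_getElem _ _ (by simp; omega)]
      rw [List.getElem_append_left (by simpa using ha)]
      simp
    have hset : PySem.List.pySetD (List.replicate a num ++ List.replicate b (num + 1)) ((a : Int) - 1) (num + 1)
        = List.replicate (a - 1) num ++ List.replicate (b + 1) (num + 1) := by
      rw [hidx, PySem.List.pySetD_natCast, set_repl a b ha num]
    rw [hget, hset]
    have h1 : ((a : Int) - 1 - 1) = ((a - 1 : Nat) : Int) - 1 := by omega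
    rw [h1]
    have := ih (a - 1) (b + 1) (by omega)
    push_cast at this ⊢
    rw [show ((r:Int) + 1 - 1) = (r:Int) by ring]
    rw [this]
    congr 2 <;> omega

-- ceiling division: for 0 < k, -((-t) fdiv k) with t = k*q + r (0 ≤ r < k)
theorem ceil_div (k q r : Int) (hk : 0 < k) (hr0 : 0 ≤ r) (hrk : r < k) :
    -(PySem.Int.floordiv (-(k * q + r)) k) = if r = 0 then q else q + 1 := by
  unfold PySem.Int.floordiv
  rw [Int.fdiv_eq_ediv, if_pos (Or.inl (by omega : (0:Int) ≤ k)), sub_zero]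
  by_cases h : r = 0
  · subst h
    rw [add_zero, show -(k * q) = (-q) * k from by ring,
      Int.mul_ediv_cancel _ (by omega : k ≠ 0)]
    simp
  · rw [if_neg h]
    have : -(k * q + r) = (k - r) + (-(q + 1)) * k := by ring
    rw [this, Int.add_mul_ediv_right _ _ (by omega : k ≠ 0)]
    rw [Int.ediv_eq_zero_of_lt (by omega) (by omega)]
    ring

-- B's loop appends r copies of q+1 then k-r copies of q onto the accumulator.
theorem buildLoop_inv : ∀ (k : Nat) (q r : Int) (out : List Int), 0 ≤ r → r < (k : Int) →
    buildLoop (k : Int) ((k : Int) * q + r) out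
    = out ++ List.replicate r.toNat (q + 1) ++ List.replicate (((k : Int) - r).toNat) q := by
  intro k
  induction k with
  | zero => intro q r out h0 h1; omega
  | succ k ih =>
    intro q r out h0 h1
    rw [buildLoop]
    rw [dif_pos (by push_cast; omega)]
    simp only []
    push_cast at h1 ⊢
    rw [ceil_div ((k:Int)+1) q r (by omega) h0 (by omega)]
    rw [show ((k:Int) + 1 - 1) = (k:Int) from by ring]
    by_cases h : r = 0
    · subst h
      simp only [if_true]
      rw [show ((k:Int) + 1) * q + 0 - q = (k : Int) * q + 0 from by ring]
      by_cases hk0 : k = 0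
      · subst hk0
        rw [buildLoop, dif_neg (by omega)]
        simp
      · rw [ih q 0 (out ++ [q]) (by omega) (by omega)]
        rw [show (((k:Int) + 1 - 0)).toNat = k + 1 from by omega,
          show (((k:Int) - 0)).toNat = k from by omega, List.replicate_succ]
        simp
    · rw [if_neg h]
      rw [show ((k:Int) + 1) * q + r - (q + 1) = (k : Int) * q + (r - 1) from by ring]
      by_cases hk0 : k = 0
      · exfalso; omega
      · rw [ih q (r - 1) (out ++ [q + 1]) (by omega) (by omega)]
        rw [show (((k:Int) - (r - 1))).toNat = (((k:Int) + 1 - r)).toNat from by omega,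
          show r.toNat = (r - 1).toNat + 1 from by omega, List.replicate_succ]
        simp

-- ===== VERDICT (by name: the statement is the Claim_ definition above) =====
theorem solution_spec : Claim_equal_solution := by
  intro n s _ hn
  unfold Spec_solution solution solution_alt
  set num := PySem.Int.floordiv s n with hnum
  set rem := PySem.Int.mod s n with hrem
  by_cases hlt : num < 1
  · simp [hlt]
  · simp only [hlt, if_false]
    rcases lt_or_gt_of_ne hn with hneg | hpos
    · -- n < 0: A's range is empty and its loop does not run; B's recursion stops at once
      have hb := fmod_neg_bounds s n hneg
      have hrange : (PySem.List.pyRange 0 n 1).map (fun _ => num) = [] := by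
        have : PySem.List.pyRange 0 n 1 = [] := by
          rw [PySem.List.pyRange_one]
          rw [show (n - 0).toNat = 0 by omega]
          rfl
        rw [this]; rfl
      rw [hrange, solutionLoop]
      rw [dif_neg (by rw [hrem]; change ¬ (0 < s.fmod n); omega)]
      rw [buildLoop, dif_neg (by omega)]
      rfl
    · -- n > 0: both sides equal the low-then-high replicate pattern
      have hre : rem = s % n := by rw [hrem]; change s.fmod n = _; rw [Int.fmod_eq_emod]; omega
      have hb1 : 0 ≤ rem := by rw [hre]; exact Int.emod_nonneg s (by omega)
      have hb2 : rem < n := by rw [hre]; exact Int.emod_lt_of_pos s hpos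
      have hrange : (PySem.List.pyRange 0 n 1).map (fun _ => num) = List.replicate n.toNat num := by
        rw [List.map_const']
        congr 1
        rw [PySem.List.length_pyRange_one]; omega
      rw [hrange]
      have h0 : List.replicate n.toNat num = List.replicate n.toNat num ++ List.replicate 0 (num + 1) := by simp
      rw [h0]
      have hcast : (n : Int) - 1 = ((n.toNat : Int)) - 1 := by omega
      rw [hcast, show rem = ((rem.toNat : Nat) : Int) by omega]
      rw [loop_inv num rem.toNat n.toNat 0 (by omega)]
      -- B side: s = n*num + rem
      have hsplit : s = n * num + rem := by
        rw [hnum, hrem]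
        change s = n * (s.fdiv n) + s.fmod n
        rw [Int.fmod_def]; ring
      have hb : (buildLoop n s []).reverse
          = List.replicate ((n - rem).toNat) num ++ List.replicate rem.toNat (num + 1) := by
        have := buildLoop_inv n.toNat num rem [] hb1 (by omega)
        rw [show ((n.toNat : Int)) = n by omega] at this
        rw [← hsplit] at this
        rw [this]
        simp [List.reverse_append]
      rw [hb]
      congr 2 <;> omega
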